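-- pv_equiv track=rewrite | github.com/hyunse0/Algorithm | PROGRAMMERS/징검다리 건너기.py | solution
-- ===== SOURCE A (Python) =====
-- def solution(stones, k):
--     answer = 0
--     while True:
--         jump = 0
--         for i in range(len(stones)):
--             if stones[i] == 0:
--                 jump += 1
--                 if jump >= k:
--                     break
--             else:
--                 jump = 0
--                 stones[i] -= 1
--
--         if jump >= k:
--             return answer
--         else:
--             answer += 1
-- ===== SOURCE B (Python) =====
-- def solution(stones, k):
--     if k <= 0:
--         return 0
--     return min(max(stones[i:i + k]) for i in range(len(stones) - k + 1))
-- ===== Notes on version B (the rewrite author's own statement) =====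
-- stated objective: alternative
-- what changed: A simulates the crossing round by round, decrementing every nonzero stone until k consecutive zeros appear; B computes the answer directly as the minimum over all length-k windows of the window maximum, with no simulation.
-- outside the precondition, e.g. on solution([-5, 3], 1): A returns 3, B returns -5
import Mathlib
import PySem

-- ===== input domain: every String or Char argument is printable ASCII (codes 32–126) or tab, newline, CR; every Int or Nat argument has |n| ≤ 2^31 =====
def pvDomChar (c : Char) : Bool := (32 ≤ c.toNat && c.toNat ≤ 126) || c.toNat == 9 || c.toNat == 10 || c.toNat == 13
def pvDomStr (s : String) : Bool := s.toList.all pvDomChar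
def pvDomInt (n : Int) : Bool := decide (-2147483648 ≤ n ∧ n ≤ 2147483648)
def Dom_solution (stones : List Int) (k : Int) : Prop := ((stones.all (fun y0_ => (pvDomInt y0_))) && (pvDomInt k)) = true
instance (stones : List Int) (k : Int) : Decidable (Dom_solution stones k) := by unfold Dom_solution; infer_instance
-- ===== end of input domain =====

-- B replaces A's round-by-round decrement simulation by the direct formula
-- min over all length-k windows of the window maximum. Python A mutates `stones`
-- in place; the equivalence proved here is about the return value only.

-- ===== PORT A =====
-- one pass of A's inner `for` loop: returns (updated stones, final jump);
-- on `break` (jump reaches k) the rest of the list is left untouched, as in A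
def roundA (k : Int) : List Int → Int → List Int × Int
  | [], j => ([], j)
  | s :: rest, j =>
    if s = 0 then
      if j + 1 ≥ k then (s :: rest, j + 1)
      else
        let p := roundA k rest (j + 1)
        (s :: p.1, p.2)
    else
      let p := roundA k rest 0
      ((s - 1) :: p.1, p.2)

-- A's `while True` loop; the fuel is only a totality guard (it never runs out
-- on inputs satisfying Pre_solution, where A terminates)
def loopA (k : Int) : Nat → List Int → Int → Int
  | 0, _, answer => answer
  | fuel + 1, stones, answer =>
    let p := roundA k stones 0
    if p.2 ≥ k then answer else loopA k fuel p.1 (answer + 1)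

def solution (stones : List Int) (k : Int) : Int :=
  loopA k ((stones.foldl (fun a s => max a s) 0).toNat + 2) stones 0

-- ===== PORT B =====
-- Python's max(l) / min(l) on a nonempty list (the empty case is unreachable under Pre_)
def pyMax (l : List Int) : Int :=
  match l with
  | [] => 0
  | x :: xs => xs.foldl max x

def pyMin (l : List Int) : Int :=
  match l with
  | [] => 0
  | x :: xs => xs.foldl min x

def solution_alt (stones : List Int) (k : Int) : Int :=
  if k ≤ 0 then 0
  else
    pyMin (((List.range ((stones.length : Int) - k + 1).toNat)).map
      (fun i => pyMax ((stones.drop i).take k.toNat)))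

-- ===== PRECONDITION & SPEC =====
-- Pre_ excludes negative stone values (the puzzle's stones are nonnegative step
-- counts; a negative stone never reaches 0 under A's decrement simulation, so A
-- either loops forever or silently treats that stone as uncrossable) and
-- positive k exceeding len(stones), where A loops forever.
def Pre_solution (stones : List Int) (k : Int) : Prop :=
  k ≤ 0 ∨ (1 ≤ k ∧ k ≤ (stones.length : Int) ∧ ∀ s ∈ stones, 0 ≤ s)
instance (stones : List Int) (k : Int) : Decidable (Pre_solution stones k) := by
  unfold Pre_solution; infer_instance

def pvWitness_solution : List Int × Int := ([2, 4, 5, 3, 2, 1, 4], 3)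

def Spec_solution (stones : List Int) (k : Int) (out : Int) : Prop := out = solution_alt stones k
instance (stones : List Int) (k : Int) (out : Int) : Decidable (Spec_solution stones k out) := by unfold Spec_solution; infer_instance

-- ===== CLAIM (what is proved, stated in full; the proofs are below) =====
def Claim_equal_solution : Prop := ∀ (stones : List Int) (k : Int), Dom_solution stones k → Pre_solution stones k → Spec_solution stones k (solution stones k)

-- ===== LEMMAS AND PROOFS =====

-- the effect of one non-breaking round on a single stone
def decS (s : Int) : Int := if s = 0 then 0 else s - 1

-- length of the zero prefix
def lead : List Int → Int
  | [] => 0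
  | x :: xs => if x = 0 then 1 + lead xs else 0

-- some suffix starts with k zeros (k consecutive zeros occur)
def hasRun (k : Int) : List Int → Prop
  | [] => (0 : Int) ≥ k
  | x :: xs => lead (x :: xs) ≥ k ∨ hasRun k xs

-- the list of window maxima that solution_alt minimises
def wins (stones : List Int) (k : Int) : List Int :=
  (List.range ((stones.length : Int) - k + 1).toNat).map
    (fun i => pyMax ((stones.drop i).take k.toNat))

theorem lead_nonneg (xs : List Int) : 0 ≤ lead xs := by
  induction xs with
  | nil => simp [lead]
  | cons x xs ih => simp only [lead]; split <;> omega

theorem round_jump_nonneg (k : Int) (xs : List Int) (j : Int) (hj : 0 ≤ j) :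
    0 ≤ (roundA k xs j).2 := by
  induction xs generalizing j with
  | nil => simpa [roundA]
  | cons x xs ih =>
    simp only [roundA]
    split
    · split
      · simp; omega
      · exact ih (j + 1) (by omega)
    · exact ih 0 le_rfl

theorem hasRun_of_lead (k : Int) (xs : List Int) (_hk : 1 ≤ k) (h : lead xs ≥ k) :
    hasRun k xs := by
  cases xs with
  | nil => simp [lead] at h; simp [hasRun]; omega
  | cons x xs => exact Or.inl h

theorem round_spec (k : Int) (xs : List Int) (j : Int) (hj : 0 ≤ j) (hjk : j < k) :
    ((roundA k xs j).2 ≥ k ↔ (j + lead xs ≥ k ∨ hasRun k xs)) ∧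
    (¬(j + lead xs ≥ k ∨ hasRun k xs) → (roundA k xs j).1 = xs.map decS) := by
  induction xs generalizing j with
  | nil =>
    refine ⟨?_, fun _ => by simp [roundA]⟩
    simp only [roundA, lead, hasRun]
    omega
  | cons x xs ih =>
    by_cases hx : x = 0
    · subst hx
      have hlead : lead (0 :: xs) = 1 + lead xs := by simp [lead]
      by_cases hbr : j + 1 ≥ k
      · have hcond : j + lead (0 :: xs) ≥ k ∨ hasRun k (0 :: xs) := by
          left; have := lead_nonneg xs; omega
        refine ⟨?_, fun hcon => absurd hcond hcon⟩
        simp only [roundA, if_pos hbr]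
        exact ⟨fun _ => hcond, fun _ => hbr⟩
      · have ⟨ih1, ih2⟩ := ih (j + 1) (by omega) (by omega)
        have habs : (j + 1 + lead xs ≥ k ∨ hasRun k xs) ↔
            (j + lead (0 :: xs) ≥ k ∨ hasRun k (0 :: xs)) := by
          simp only [hasRun, hlead]
          constructor
          · rintro (h | h)
            · left; omega
            · right; right; exact h
          · rintro (h | h | h)
            · left; omega
            · left; omega
            · right; exact h
        refine ⟨?_, ?_⟩
        · simp only [roundA, if_neg hbr]
          rw [← habs]; exact ih1
        · intro hcon
          simp only [roundA, if_neg hbr, List.map_cons]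
          rw [ih2 (by rw [habs]; exact hcon)]
          simp [decS]
    · have hk1 : (1 : Int) ≤ k := by omega
      have ⟨ih1, ih2⟩ := ih 0 le_rfl (by omega)
      have hlead : lead (x :: xs) = 0 := by simp [lead, hx]
      have habs : (0 + lead xs ≥ k ∨ hasRun k xs) ↔
          (j + lead (x :: xs) ≥ k ∨ hasRun k (x :: xs)) := by
        simp only [hasRun, hlead]
        constructor
        · rintro (h | h)
          · right; right; exact hasRun_of_lead k xs hk1 (by omega)
          · right; right; exact h
        · rintro (h | h | h)
          · omega
          · omega
          · right; exact h
      refine ⟨?_, ?_⟩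
      · simp only [roundA, if_neg hx]
        rw [← habs]; exact ih1
      · intro hcon
        simp only [roundA, if_neg hx, List.map_cons]
        rw [ih2 (by rw [habs]; exact hcon)]
        simp [decS, hx]

-- basic foldl max / min facts
theorem foldl_max_mem (l : List Int) (a : Int) : l.foldl max a = a ∨ l.foldl max a ∈ l := by
  induction l generalizing a with
  | nil => simp
  | cons x xs ih =>
    simp only [List.foldl_cons]
    rcases ih (max a x) with h | h
    · rcases max_cases a x with ⟨he, _⟩ | ⟨he, _⟩
      · left; rw [h, he]
      · right; rw [h, he]; simp
    · right; simp [h]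

theorem foldl_min_le_init (l : List Int) (a : Int) : l.foldl min a ≤ a := by
  induction l generalizing a with
  | nil => simp
  | cons x xs ih => exact le_trans (ih (min a x)) (min_le_left a x)

theorem foldl_min_le_of_mem (l : List Int) (a x : Int) (hx : x ∈ l) : l.foldl min a ≤ x := by
  induction l generalizing a with
  | nil => simp at hx
  | cons y ys ih =>
    simp only [List.foldl_cons]
    rcases List.mem_cons.mp hx with h | h
    · subst h; exact le_trans (foldl_min_le_init _ _) (min_le_right _ _)
    · exact ih _ h

theorem le_foldl_min (l : List Int) (a b : Int) (ha : b ≤ a) (hl : ∀ x ∈ l, b ≤ x) :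
    b ≤ l.foldl min a := by
  induction l generalizing a with
  | nil => simpa
  | cons x xs ih =>
    simp only [List.foldl_cons]
    exact ih _ (le_min ha (hl x (by simp))) (fun y hy => hl y (by simp [hy]))

-- foldl max/min commute with a monotone map
theorem foldl_max_map (f : Int → Int) (hf : ∀ a b, f (max a b) = max (f a) (f b))
    (l : List Int) (a : Int) : (l.map f).foldl max (f a) = f (l.foldl max a) := by
  induction l generalizing a with
  | nil => simp
  | cons x xs ih => simp only [List.map_cons, List.foldl_cons, ← hf]; exact ih _

theorem foldl_min_map (f : Int → Int) (hf : ∀ a b, f (min a b) = min (f a) (f b))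
    (l : List Int) (a : Int) : (l.map f).foldl min (f a) = f (l.foldl min a) := by
  induction l generalizing a with
  | nil => simp
  | cons x xs ih => simp only [List.map_cons, List.foldl_cons, ← hf]; exact ih _

theorem pyMax_mem (l : List Int) (hl : l ≠ []) : pyMax l ∈ l := by
  cases l with
  | nil => exact absurd rfl hl
  | cons x xs =>
    simp only [pyMax]
    rcases foldl_max_mem xs x with h | h
    · simp [h]
    · simp [h]

theorem le_pyMax (l : List Int) (x : Int) (hx : x ∈ l) : x ≤ pyMax l := by
  cases l with
  | nil => simp at hx
  | cons y ys =>
    simp only [pyMax]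
    rcases List.mem_cons.mp hx with h | h
    · subst h; exact (PySem.List.le_foldl_max ys x).1
    · exact (PySem.List.le_foldl_max ys y).2 x h

theorem pyMin_le (l : List Int) (x : Int) (hx : x ∈ l) : pyMin l ≤ x := by
  cases l with
  | nil => simp at hx
  | cons y ys =>
    simp only [pyMin]
    rcases List.mem_cons.mp hx with h | h
    · subst h; exact foldl_min_le_init _ _
    · exact foldl_min_le_of_mem _ _ _ h

theorem le_pyMin (l : List Int) (b : Int) (hl : l ≠ []) (h : ∀ x ∈ l, b ≤ x) : b ≤ pyMin l := by
  cases l with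
  | nil => exact absurd rfl hl
  | cons x xs => exact le_foldl_min _ _ _ (h x (by simp)) (fun y hy => h y (by simp [hy]))

theorem pyMin_map_sub_one (l : List Int) (hl : l ≠ []) :
    pyMin (l.map (fun x => x - 1)) = pyMin l - 1 := by
  cases l with
  | nil => exact absurd rfl hl
  | cons x xs =>
    simp only [pyMin, List.map_cons]
    exact foldl_min_map (fun x => x - 1)
      (by intro a b; simp only [min_def]; split_ifs <;> omega) xs x

-- pyMax of a mapped decS window: dec every positive entry of a nonneg list drops the max by 1
theorem pyMax_map_decS (l : List Int) (hl : l ≠ []) (hnn : ∀ x ∈ l, 0 ≤ x)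
    (hpos : 1 ≤ pyMax l) : pyMax (l.map decS) = pyMax l - 1 := by
  have hmap : l.map decS = l.map (fun x => max (x - 1) 0) := by
    apply List.map_congr_left
    intro x hx
    have := hnn x hx
    simp only [decS]
    split <;> omega
  rw [hmap]
  cases l with
  | nil => exact absurd rfl hl
  | cons x xs =>
    simp only [pyMax, List.map_cons] at hpos ⊢
    rw [foldl_max_map (fun x => max (x - 1) 0)
      (by intro a b; simp only [max_def]; split_ifs <;> omega) xs x]
    simp only [max_def]; split_ifs <;> omega

-- window helper facts
theorem window_length (stones : List Int) (kn i : Nat) (h : i + kn ≤ stones.length) :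
    ((stones.drop i).take kn).length = kn := by
  simp [List.length_take, List.length_drop]; omega

theorem window_ne_nil (stones : List Int) (kn i : Nat) (hk : 1 ≤ kn)
    (h : i + kn ≤ stones.length) : (stones.drop i).take kn ≠ [] := by
  intro hcon
  have := window_length stones kn i h
  rw [hcon] at this
  simp at this; omega

-- hasRun ↔ an all-zero window of length kn exists
theorem lead_ge_iff (xs : List Int) (r : Nat) :
    ((r : Int) ≤ lead xs) ↔ (r ≤ xs.length ∧ ∀ x ∈ xs.take r, x = 0) := by
  induction xs generalizing r with
  | nil =>
    simp only [lead, List.length_nil, List.take_nil]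
    constructor
    · intro h; constructor
      · omega
      · simp
    · intro ⟨h, _⟩; omega
  | cons x xs ih =>
    cases r with
    | zero => simp [lead_nonneg]
    | succ r =>
      simp only [lead, List.length_cons, List.take_succ_cons]
      by_cases hx : x = 0
      · simp only [if_pos hx]
        rw [show ((r + 1 : Nat) : Int) = (r : Int) + 1 by push_cast; ring]
        constructor
        · intro h
          have := (ih r).mp (by omega)
          exact ⟨by omega, by intro y hy; rcases List.mem_cons.mp hy with h' | h'
                              · rw [h']; exact hx
                              · exact this.2 y h'⟩
        · intro ⟨h1, h2⟩
          have := (ih r).mpr ⟨by omega, fun y hy => h2 y (by simp [hy])⟩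
          omega
      · simp only [if_neg hx]
        constructor
        · intro h; exfalso; omega
        · intro ⟨_, h2⟩; exact absurd (h2 x (by simp)) hx

theorem hasRun_iff (k : Int) (xs : List Int) (hk : 1 ≤ k) :
    hasRun k xs ↔ ∃ i, i + k.toNat ≤ xs.length ∧ ∀ x ∈ (xs.drop i).take k.toNat, x = 0 := by
  induction xs with
  | nil =>
    simp only [hasRun, List.length_nil, List.drop_nil, List.take_nil]
    constructor
    · intro h; omega
    · intro ⟨i, hi, _⟩; omega
  | cons x xs ih =>
    simp only [hasRun]
    constructor
    · rintro (h | h)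
      · refine ⟨0, ?_, ?_⟩
        · have := (lead_ge_iff (x :: xs) k.toNat).mp (by omega)
          simpa using this.1
        · have := (lead_ge_iff (x :: xs) k.toNat).mp (by omega)
          simpa using this.2
      · obtain ⟨i, hi, hall⟩ := (ih).mp h
        exact ⟨i + 1, by simpa using (by omega : i + 1 + k.toNat ≤ xs.length + 1), by
          simpa using hall⟩
    · rintro ⟨i, hi, hall⟩
      cases i with
      | zero =>
        left
        have : (k.toNat : Int) ≤ lead (x :: xs) := by
          rw [lead_ge_iff]
          exact ⟨by simpa using hi, by simpa using hall⟩
        omega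
      | succ i =>
        right
        exact ih.mpr ⟨i, by simp at hi; omega, by simpa using hall⟩

theorem wins_ne_nil (stones : List Int) (k : Int) (_hk : 1 ≤ k)
    (hlen : k ≤ (stones.length : Int)) : wins stones k ≠ [] := by
  simp only [wins, ne_eq, List.map_eq_nil_iff, List.range_eq_nil]
  omega

-- W = 0 when a k-run of zeros exists (nonneg stones)
theorem pyMin_wins_eq_zero (stones : List Int) (k : Int) (hk : 1 ≤ k)
    (hlen : k ≤ (stones.length : Int)) (hnn : ∀ s ∈ stones, 0 ≤ s)
    (hrun : hasRun k stones) : pyMin (wins stones k) = 0 := by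
  obtain ⟨i, hi, hall⟩ := (hasRun_iff k stones hk).mp hrun
  have hwnn : ∀ x ∈ wins stones k, 0 ≤ x := by
    intro x hx
    simp only [wins, List.mem_map, List.mem_range] at hx
    obtain ⟨j, hj, rfl⟩ := hx
    have hne : (stones.drop j).take k.toNat ≠ [] := by
      apply window_ne_nil _ _ _ (by omega)
      omega
    have hmem := pyMax_mem _ hne
    exact hnn _ (List.mem_of_mem_drop (List.mem_of_mem_take hmem))
  have hzero : pyMax ((stones.drop i).take k.toNat) = 0 := by
    have hne := window_ne_nil stones k.toNat i (by omega) hi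
    exact hall _ (pyMax_mem _ hne)
  have hmem : (0 : Int) ∈ wins stones k := by
    rw [← hzero]
    simp only [wins, List.mem_map, List.mem_range]
    exact ⟨i, by omega, rfl⟩
  have h1 := pyMin_le _ _ hmem
  have h2 := le_pyMin (wins stones k) 0 (wins_ne_nil stones k hk hlen) hwnn
  omega

-- every window max ≥ 1 when no k-run of zeros exists (nonneg stones)
theorem window_max_pos (stones : List Int) (k : Int) (hk : 1 ≤ k)
    (hnn : ∀ s ∈ stones, 0 ≤ s) (hrun : ¬ hasRun k stones)
    (i : Nat) (hi : i + k.toNat ≤ stones.length) :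
    1 ≤ pyMax ((stones.drop i).take k.toNat) := by
  by_contra hcon
  rw [not_le] at hcon
  apply hrun
  rw [hasRun_iff k stones hk]
  refine ⟨i, hi, ?_⟩
  intro x hx
  have h1 := le_pyMax _ _ hx
  have h2 := hnn x (List.mem_of_mem_drop (List.mem_of_mem_take hx))
  omega

-- decrementing a round with no k-run drops every window max, hence W, by 1
theorem pyMin_wins_dec (stones : List Int) (k : Int) (hk : 1 ≤ k)
    (hlen : k ≤ (stones.length : Int)) (hnn : ∀ s ∈ stones, 0 ≤ s)
    (hrun : ¬ hasRun k stones) :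
    pyMin (wins (stones.map decS) k) = pyMin (wins stones k) - 1 := by
  have hlenmap : (stones.map decS).length = stones.length := by simp
  have hwin : wins (stones.map decS) k = (wins stones k).map (fun x => x - 1) := by
    simp only [wins, hlenmap, List.map_map]
    apply List.map_congr_left
    intro i hi
    simp only [List.mem_range] at hi
    have hik : i + k.toNat ≤ stones.length := by omega
    simp only [Function.comp]
    rw [show List.take k.toNat (List.drop i (List.map decS stones)) =
        List.map decS (List.take k.toNat (List.drop i stones)) by
      simp [List.map_take, List.map_drop]]
    exact pyMax_map_decS _ (window_ne_nil stones k.toNat i (by omega) hik)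
      (fun x hx => hnn x (List.mem_of_mem_drop (List.mem_of_mem_take hx)))
      (window_max_pos stones k hk hnn hrun i hik)
  rw [hwin]
  exact pyMin_map_sub_one _ (wins_ne_nil stones k hk hlen)

theorem pyMin_wins_pos (stones : List Int) (k : Int) (hk : 1 ≤ k)
    (hlen : k ≤ (stones.length : Int)) (hnn : ∀ s ∈ stones, 0 ≤ s)
    (hrun : ¬ hasRun k stones) : 1 ≤ pyMin (wins stones k) := by
  apply le_pyMin _ _ (wins_ne_nil stones k hk hlen)
  intro x hx
  simp only [wins, List.mem_map, List.mem_range] at hx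
  obtain ⟨j, hj, rfl⟩ := hx
  exact window_max_pos stones k hk hnn hrun j (by omega)

theorem map_decS_nonneg (stones : List Int) (hnn : ∀ s ∈ stones, 0 ≤ s) :
    ∀ s ∈ stones.map decS, 0 ≤ s := by
  intro s hs
  simp only [List.mem_map] at hs
  obtain ⟨x, hx, rfl⟩ := hs
  have := hnn x hx
  simp only [decS]; split <;> omega

-- the main loop invariant
theorem loopA_eq (k : Int) (hk : 1 ≤ k) :
    ∀ (fuel : Nat) (stones : List Int) (answer : Int),
      k ≤ (stones.length : Int) → (∀ s ∈ stones, 0 ≤ s) →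
      (pyMin (wins stones k)).toNat < fuel →
      loopA k fuel stones answer = answer + pyMin (wins stones k) := by
  intro fuel
  induction fuel with
  | zero => intro stones answer _ _ hf; omega
  | succ fuel ih =>
    intro stones answer hlen hnn hf
    have ⟨hjump, hst⟩ := round_spec k stones 0 le_rfl (by omega)
    by_cases hrun : hasRun k stones
    · have : (roundA k stones 0).2 ≥ k := hjump.mpr (Or.inr hrun)
      simp only [loopA, if_pos this]
      rw [pyMin_wins_eq_zero stones k hk hlen hnn hrun]
      ring
    · have hnlead : ¬ (0 + lead stones ≥ k ∨ hasRun k stones) := by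
        rintro (h | h)
        · exact hrun (hasRun_of_lead k stones hk (by omega))
        · exact hrun h
      have hjl : ¬ ((roundA k stones 0).2 ≥ k) := fun h => hnlead (hjump.mp h)
      simp only [loopA, if_neg hjl]
      rw [hst hnlead]
      have hlen' : k ≤ ((stones.map decS).length : Int) := by simpa using hlen
      have hnn' := map_decS_nonneg stones hnn
      have hdec := pyMin_wins_dec stones k hk hlen hnn hrun
      have hpos := pyMin_wins_pos stones k hk hlen hnn hrun
      rw [ih (stones.map decS) (answer + 1) hlen' hnn' (by omega)]
      rw [hdec]; ring

theorem pyMin_wins_le_max (stones : List Int) (k : Int) (hk : 1 ≤ k)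
    (hlen : k ≤ (stones.length : Int)) :
    pyMin (wins stones k) ≤ stones.foldl (fun a s => max a s) 0 := by
  have h0 : (0 : Nat) < ((stones.length : Int) - k + 1).toNat := by omega
  have hw0 : pyMax ((stones.drop 0).take k.toNat) ∈ wins stones k := by
    simp only [wins, List.mem_map, List.mem_range]
    exact ⟨0, h0, rfl⟩
  have h1 := pyMin_le _ _ hw0
  have hne := window_ne_nil stones k.toNat 0 (by omega) (by omega)
  have hmem := pyMax_mem _ hne
  have hmem' : pyMax ((stones.drop 0).take k.toNat) ∈ stones :=
    List.mem_of_mem_drop (List.mem_of_mem_take hmem)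
  have h2 : pyMax ((stones.drop 0).take k.toNat) ≤ stones.foldl (fun a s => max a s) 0 :=
    (PySem.List.le_foldl_max stones 0).2 _ hmem'
  omega

-- ===== VERDICT (by name: the statement is the Claim_ definition above) =====
theorem solution_spec : Claim_equal_solution := by
  intro stones k _ hpre
  unfold Spec_solution solution solution_alt
  rcases hpre with hk | ⟨hk1, hlen, hnn⟩
  · -- k ≤ 0: A's first round always ends with jump ≥ 0 ≥ k, returning 0
    simp only [if_pos hk]
    have hj := round_jump_nonneg k stones 0 le_rfl
    have : (roundA k stones 0).2 ≥ k := by omega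
    simp [loopA, if_pos this]
  · have hk0 : ¬ k ≤ 0 := by omega
    simp only [if_neg hk0]
    have hb := pyMin_wins_le_max stones k hk1 hlen
    have hfuel : (pyMin (wins stones k)).toNat <
        ((stones.foldl (fun a s => max a s) 0).toNat + 2) := by
      have := (PySem.List.le_foldl_max stones 0).1
      omega
    rw [loopA_eq k hk1 _ stones 0 hlen hnn hfuel]
    simp [wins]
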